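-- pv_equiv track=rewrite | github.com/Uncle-Uee/HackerRank-Problems | Practice/WeightedUniformString.py | weightedUniformString
-- ===== SOURCE A (Python) =====
-- def weightedUniformString(s, queries):
-- 	previous_letter = s[0]
-- 	weight = ord(previous_letter) - 96
-- 	weights = [weight]
-- 	answers = []
--
-- 	for next_letter in s[1:]:
-- 		if previous_letter == next_letter:
-- 			weight += ord(previous_letter) - 96
-- 			weights.append(weight)
-- 		else:
-- 			weights.append(ord(next_letter) - 96)
-- 			previous_letter = next_letter
-- 			weight = ord(previous_letter) - 96
--
-- 	for query in queries:
-- 		answers.append("Yes") if query in weights else answers.append("No")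
--
-- 	return answers
-- ===== SOURCE B (Python) =====
-- def weightedUniformString(s, queries):
--     # longest consecutive run length per character; no weight list is materialized
--     longest = {}
--     rest = s
--     while rest:
--         c = rest[0]
--         run = 1
--         while run < len(rest) and rest[run] == c:
--             run += 1
--         if run > longest.get(c, 0):
--             longest[c] = run
--         rest = rest[run:]
--
--     def reachable(q):
--         # q is a prefix weight of some run iff q = k*v for some 1 <= k <= longest[c]
--         for c, L in longest.items():
--             v = ord(c) - 96
--             if v == 0:
--                 if q == 0:
--                     return True
--             elif q % v == 0 and 1 <= q // v <= L:
--                 return True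
--         return False
--
--     return ["Yes" if reachable(q) else "No" for q in queries]
-- ===== Notes on version B (the rewrite author's own statement) =====
-- stated objective: faster
-- what changed: Instead of materializing any collection of prefix weights, B records only the longest run length per character and answers each query arithmetically: q is reachable iff q = k*v for the letter value v with q % v == 0 and 1 <= q//v <= longest[c].
-- crash fix: On the empty string A raises IndexError at s[0]; B returns 'No' for every query. — e.g. on weightedUniformString("", [1]): A raises IndexError, B returns ["No"]
import Mathlib
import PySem

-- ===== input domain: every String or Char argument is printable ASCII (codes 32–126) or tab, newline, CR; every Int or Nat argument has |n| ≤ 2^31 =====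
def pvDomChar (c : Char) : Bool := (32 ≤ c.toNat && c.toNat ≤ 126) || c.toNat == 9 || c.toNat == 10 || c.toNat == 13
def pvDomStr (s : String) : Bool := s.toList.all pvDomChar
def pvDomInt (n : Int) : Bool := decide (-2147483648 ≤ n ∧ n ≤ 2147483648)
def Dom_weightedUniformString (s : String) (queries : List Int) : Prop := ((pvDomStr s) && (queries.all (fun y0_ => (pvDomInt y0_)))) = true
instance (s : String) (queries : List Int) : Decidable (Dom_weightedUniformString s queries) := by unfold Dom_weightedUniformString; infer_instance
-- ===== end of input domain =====

-- B materializes no weight collection at all: it records the longest run per character and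
-- answers each query by an arithmetic divisibility test; equivalence of RETURN values is
-- proved for nonempty s (A raises IndexError on the empty string).

-- ===== PORT A =====
-- loop body of A's first for-loop: state = (previous_letter, weight, weights)
def stepA (st : Char × Int × List Int) (nl : Char) : Char × Int × List Int :=
  if st.1 == nl then
    (st.1, st.2.1 + ((st.1.toNat : Int) - 96), st.2.2 ++ [st.2.1 + ((st.1.toNat : Int) - 96)])
  else
    (nl, ((nl.toNat : Int) - 96), st.2.2 ++ [((nl.toNat : Int) - 96)])

def weightedUniformString (s : String) (queries : List Int) : List String :=
  match PySem.List.pyGet? s.toList 0 with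
  | none => []  -- Python raises IndexError here (s = ""); excluded by Pre_
  | some previous_letter =>
    let weight : Int := (previous_letter.toNat : Int) - 96
    let st := (PySem.List.slice s.toList (some 1) none).foldl stepA
                (previous_letter, weight, [weight])
    queries.foldl
      (fun answers query =>
        if st.2.2.contains query then answers ++ ["Yes"] else answers ++ ["No"]) []

-- ===== PORT B =====
-- Source B's outer while-loop: peel one run of the leading character, keep the longest run per char
def collectLongest : List Char → PySem.Dict Char Int → PySem.Dict Char Int
  | [], longest => longest
  | c :: t, longest =>
    let run : Int := 1 + (t.takeWhile (fun d => d == c)).length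
    let longest' := if longest.getD c 0 < run then longest.insert c run else longest
    collectLongest (t.dropWhile (fun d => d == c)) longest'
termination_by l _ => l.length
decreasing_by
  simpa using Nat.lt_succ_of_le (List.length_dropWhile_le (fun d => d == c) t)

-- Source B's reachable(q): scan the dict items, arithmetic test per item (early return = any)
def reachQ (longest : PySem.Dict Char Int) (q : Int) : Bool :=
  longest.items.any (fun p =>
    let v : Int := (p.1.toNat : Int) - 96
    if v == 0 then q == 0
    else PySem.Int.mod q v == 0
         && decide (1 ≤ PySem.Int.floordiv q v) && decide (PySem.Int.floordiv q v ≤ p.2))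

def weightedUniformString_alt (s : String) (queries : List Int) : List String :=
  let longest := collectLongest s.toList PySem.Dict.empty
  queries.map (fun q => if reachQ longest q then "Yes" else "No")

-- ===== PRECONDITION & SPEC =====
-- Pre_ excludes exactly the empty string, on which Python A raises IndexError at s[0].
def Pre_weightedUniformString (s : String) (queries : List Int) : Prop := s.toList ≠ []
instance (s : String) (queries : List Int) : Decidable (Pre_weightedUniformString s queries) := by
  unfold Pre_weightedUniformString; infer_instance

def pvWitness_weightedUniformString : String × List Int := ("abbcccde", [1, 4, 3, 6, 100])

-- On the empty string A raises IndexError while B naturally returns "No" for every query.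
def Raises_weightedUniformString (s : String) (queries : List Int) : Prop := s.toList = []
instance (s : String) (queries : List Int) : Decidable (Raises_weightedUniformString s queries) := by
  unfold Raises_weightedUniformString; infer_instance
def pvRaiseWitness_weightedUniformString : String × List Int := ("", [1])
def pvRaiseWitnessOut_weightedUniformString : List String := ["No"]

def Spec_weightedUniformString (s : String) (queries : List Int) (out : List String) : Prop :=
  out = weightedUniformString_alt s queries
instance (s : String) (queries : List Int) (out : List String) : Decidable (Spec_weightedUniformString s queries out) := by
  unfold Spec_weightedUniformString; infer_instance

-- ===== CLAIM (what is proved, stated in full; the proofs are below) =====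
def Claim_equal_weightedUniformString : Prop := ∀ (s : String) (queries : List Int), Dom_weightedUniformString s queries → Pre_weightedUniformString s queries → Spec_weightedUniformString s queries (weightedUniformString s queries)
def Claim_raises_weightedUniformString : Prop := (∀ (s : String) (queries : List Int), Dom_weightedUniformString s queries → Raises_weightedUniformString s queries → ¬ Pre_weightedUniformString s queries) ∧ (Dom_weightedUniformString (pvRaiseWitness_weightedUniformString.1) (pvRaiseWitness_weightedUniformString.2) ∧ Raises_weightedUniformString (pvRaiseWitness_weightedUniformString.1) (pvRaiseWitness_weightedUniformString.2) ∧ weightedUniformString_alt (pvRaiseWitness_weightedUniformString.1) (pvRaiseWitness_weightedUniformString.2) = pvRaiseWitnessOut_weightedUniformString)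

-- ===== LEMMAS AND PROOFS =====

-- letter value
def lv (c : Char) : Int := (c.toNat : Int) - 96

-- "q is a prefix weight of a run of c of length L"
def reachP (c : Char) (L : Int) (q : Int) : Prop := ∃ k : Int, 1 ≤ k ∧ k ≤ L ∧ q = k * lv c

-- the per-run weights A generates, run by run
def runWeights : List Char → List Int
  | [] => []
  | c :: t =>
    (List.range (1 + (t.takeWhile (fun d => d == c)).length)).map
        (fun i : Nat => ((i : Int) + 1) * lv c)
      ++ runWeights (t.dropWhile (fun d => d == c))
termination_by l => l.length
decreasing_by
  simpa using Nat.lt_succ_of_le (List.length_dropWhile_le (fun d => d == c) t)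

theorem stepA_prefix (t : List Char) (c : Char) (w : Int) (ws ws' : List Int) :
    List.foldl stepA (c, w, ws ++ ws') t
      = ((List.foldl stepA (c, w, ws') t).1,
         (List.foldl stepA (c, w, ws') t).2.1,
         ws ++ (List.foldl stepA (c, w, ws') t).2.2) := by
  induction t generalizing c w ws' with
  | nil => simp
  | cons x t ih =>
    simp only [List.foldl_cons, stepA]
    split
    · simpa [List.append_assoc] using ih c _ (ws' ++ [w + (↑c.toNat - 96)])
    · simpa [List.append_assoc] using ih x _ (ws' ++ [((x.toNat : Int) - 96)])

theorem takeWhile_beq_replicate (t : List Char) (c : Char) :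
    t.takeWhile (fun d => d == c) = List.replicate (t.takeWhile (fun d => d == c)).length c := by
  rw [List.eq_replicate_iff]
  refine ⟨rfl, fun b hb => ?_⟩
  simpa using List.mem_takeWhile_imp hb

theorem foldA_replicate (j : Nat) (c : Char) (w : Int) (ws : List Int) :
    List.foldl stepA (c, w, ws) (List.replicate j c)
      = (c, w + (j : Int) * lv c,
         ws ++ (List.range j).map (fun i : Nat => w + ((i : Int) + 1) * lv c)) := by
  induction j generalizing w ws with
  | zero => simp
  | succ j ih =>
    rw [List.replicate_succ]
    simp only [List.foldl_cons, stepA, BEq.rfl, if_pos]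
    rw [ih]
    refine Prod.ext rfl (Prod.ext ?_ ?_)
    · show w + (↑c.toNat - 96) + (j : Int) * lv c = w + ((j : Int) + 1) * lv c
      simp only [lv]; ring
    · show ws ++ [w + ((c.toNat : Int) - 96)]
            ++ (List.range j).map (fun i : Nat => w + ((c.toNat : Int) - 96) + ((i : Int) + 1) * lv c)
          = ws ++ (List.range (j + 1)).map (fun i : Nat => w + ((i : Int) + 1) * lv c)
      rw [List.range_succ_eq_map, List.map_cons, List.map_map, List.append_assoc,
        List.singleton_append]
      refine congrArg (ws ++ ·) ?_
      refine List.cons_eq_cons.mpr ⟨?_, ?_⟩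
      · simp only [lv, Nat.cast_zero, zero_add, one_mul]
      · apply List.map_congr_left
        intro i _
        simp only [Function.comp, lv]; push_cast; ring

theorem range_map_mul_split (L : Nat) (v : Int) :
    (List.range (1 + L)).map (fun i : Nat => ((i : Int) + 1) * v)
      = [v] ++ (List.range L).map (fun i : Nat => v + ((i : Int) + 1) * v) := by
  rw [Nat.add_comm 1 L, List.range_succ_eq_map, List.map_cons, List.map_map]
  simp only [List.singleton_append, Nat.cast_zero, zero_add, one_mul, List.cons.injEq, true_and]
  apply List.map_congr_left
  intro i _
  simp only [Function.comp]; push_cast; ring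

theorem foldA_eq_runWeights (n : Nat) :
    ∀ (t : List Char), t.length ≤ n → ∀ (c : Char),
      (List.foldl stepA (c, lv c, [lv c]) t).2.2 = runWeights (c :: t) := by
  induction n with
  | zero =>
    intro t ht c
    interval_cases h : t.length
    rw [List.length_eq_zero_iff.mp h]
    simp [runWeights, lv]
  | succ n ih =>
    intro t ht c
    have hsplit : t = t.takeWhile (fun d => d == c) ++ t.dropWhile (fun d => d == c) :=
      (List.takeWhile_append_dropWhile).symm
    set j := (t.takeWhile (fun d => d == c)).length with hj
    have hrep := takeWhile_beq_replicate t c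
    rw [runWeights]
    conv_lhs => rw [hsplit, List.foldl_append, hrep, ← hj]
    rw [foldA_replicate]
    have hfirst : ([lv c] ++ (List.range j).map (fun i : Nat => lv c + ((i : Int) + 1) * lv c))
        = (List.range (1 + j)).map (fun i : Nat => ((i : Int) + 1) * lv c) :=
      (range_map_mul_split j (lv c)).symm
    cases hdrop : t.dropWhile (fun d => d == c) with
    | nil =>
      simp only [List.singleton_append] at hfirst
      rw [← hj, ← hfirst]
      simp [runWeights]
    | cons d t' =>
      have hd : (d == c) = false := by
        have := List.head_dropWhile_not (fun d => d == c) (l := t)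
          (by rw [hdrop]; exact List.cons_ne_nil _ _)
        simpa [hdrop] using this
      have hdc : (c == d) = false := by
        rcases beq_eq_false_iff_ne.mp hd with h
        exact beq_eq_false_iff_ne.mpr (Ne.symm h)
      simp only [List.foldl_cons, stepA, hdc, if_neg, Bool.false_eq_true, not_false_iff]
      have hws : ([lv c] ++ (List.range j).map (fun i : Nat => lv c + ((i : Int) + 1) * lv c))
            ++ [((d.toNat : Int) - 96)]
          = ((List.range (1 + j)).map (fun i : Nat => ((i : Int) + 1) * lv c)) ++ [lv d] := by
        rw [hfirst]; rfl
      rw [hws, stepA_prefix]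
      have hlen : t'.length ≤ n := by
        have h1 : (t.dropWhile (fun d => d == c)).length ≤ t.length :=
          List.length_dropWhile_le _ _
        rw [hdrop] at h1
        simp only [List.length_cons] at h1
        omega
      have := ih t' hlen d
      show _ ++ (List.foldl stepA (d, (d.toNat : Int) - 96, [(d.toNat : Int) - 96]) t').2.2 = _
      have hlvd : ((d.toNat : Int) - 96) = lv d := rfl
      rw [hlvd, this]

theorem mem_runWeights_run (q : Int) (L : Nat) (v : Int) :
    (q ∈ (List.range L).map (fun i : Nat => ((i : Int) + 1) * v))
      ↔ ∃ k : Int, (1 ≤ k ∧ k < (L : Int) + 1) ∧ q = k * v := by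
  simp only [List.mem_map, List.mem_range]
  constructor
  · rintro ⟨i, hi, rfl⟩
    exact ⟨(i : Int) + 1, ⟨by omega, by omega⟩, rfl⟩
  · rintro ⟨k, ⟨h1, h2⟩, rfl⟩
    refine ⟨(k - 1).toNat, by omega, ?_⟩
    have hk : (((k - 1).toNat : Int)) = k - 1 := by omega
    rw [hk]; ring

-- arithmetic core: exact-division test ↔ "q is a multiple k*v with 1 ≤ k ≤ L"
theorem arith_iff (v L q : Int) (hv : v ≠ 0) :
    (PySem.Int.mod q v = 0 ∧ 1 ≤ PySem.Int.floordiv q v ∧ PySem.Int.floordiv q v ≤ L)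
      ↔ ∃ k : Int, 1 ≤ k ∧ k ≤ L ∧ q = k * v := by
  constructor
  · rintro ⟨h0, h1, h2⟩
    refine ⟨PySem.Int.floordiv q v, h1, h2, ?_⟩
    have := PySem.Int.floordiv_mul_add_mod q v
    omega
  · rintro ⟨k, h1, h2, rfl⟩
    have hmod : PySem.Int.mod (k * v) v = 0 := by
      rw [PySem.Int.mod_eq_zero_iff_dvd]
      exact Dvd.intro_left k rfl
    have hq := PySem.Int.floordiv_mul_add_mod (k * v) v
    rw [hmod, add_zero] at hq
    have hfd : PySem.Int.floordiv (k * v) v = k := mul_right_cancel₀ hv hq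
    exact ⟨hmod, by rw [hfd]; exact ⟨h1, h2⟩⟩

-- the per-item boolean of reachQ decides reachP, provided the stored length is ≥ 1
theorem reachItem_iff (c : Char) (L : Int) (q : Int) (hL : 1 ≤ L) :
    ((if ((c.toNat : Int) - 96) == 0 then q == 0
      else PySem.Int.mod q ((c.toNat : Int) - 96) == 0
           && decide (1 ≤ PySem.Int.floordiv q ((c.toNat : Int) - 96))
           && decide (PySem.Int.floordiv q ((c.toNat : Int) - 96) ≤ L)) = true)
      ↔ reachP c L q := by
  by_cases hv : ((c.toNat : Int) - 96) = 0
  · simp only [hv, beq_self_eq_true, if_pos, beq_iff_eq, reachP, lv]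
    constructor
    · rintro rfl; exact ⟨1, le_refl 1, hL, by ring⟩
    · rintro ⟨k, _, _, rfl⟩; ring
  · rw [if_neg (by simpa using hv)]
    simp only [Bool.and_eq_true, beq_iff_eq, decide_eq_true_eq, and_assoc]
    exact arith_iff _ L q hv

-- main invariant of Source B's first loop
theorem collectLongest_inv (n : Nat) :
    ∀ (l : List Char), l.length ≤ n → ∀ (d : PySem.Dict Char Int),
      d.keys.Nodup → (∀ p ∈ d.items, 1 ≤ p.2) →
      ((collectLongest l d).keys.Nodup ∧ (∀ p ∈ (collectLongest l d).items, 1 ≤ p.2) ∧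
        ∀ q : Int, ((∃ p ∈ (collectLongest l d).items, reachP p.1 p.2 q)
          ↔ (∃ p ∈ d.items, reachP p.1 p.2 q) ∨ q ∈ runWeights l)) := by
  induction n with
  | zero =>
    intro l hl d hnd hge
    interval_cases h : l.length
    rw [List.length_eq_zero_iff.mp h, collectLongest]
    exact ⟨hnd, hge, fun q => by simp [runWeights]⟩
  | succ n ih =>
    intro l hl d hnd hge
    cases l with
    | nil =>
      rw [collectLongest]
      exact ⟨hnd, hge, fun q => by simp [runWeights]⟩
    | cons c t =>
      rw [collectLongest]
      set run : Int := 1 + (t.takeWhile (fun d => d == c)).length with hrun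
      have hrun1 : 1 ≤ run := by
        rw [hrun]; have : (0 : Int) ≤ ((t.takeWhile (fun d => d == c)).length : Int) := by positivity
        omega
      set d' := if d.getD c 0 < run then d.insert c run else d with hd'
      have hlen : (t.dropWhile (fun d => d == c)).length ≤ n := by
        have h1 : (t.dropWhile (fun d => d == c)).length ≤ t.length :=
          List.length_dropWhile_le _ _
        simp only [List.length_cons] at hl
        omega
      have hnd' : d'.keys.Nodup := by
        rw [hd']; split
        · exact PySem.Dict.nodup_keys_insert d c run hnd
        · exact hnd
      have hge' : ∀ p ∈ d'.items, 1 ≤ p.2 := by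
        rw [hd']; split
        · intro p hp
          rcases (PySem.Dict.mem_items_insert _ _ _ _).mp hp with rfl | ⟨hp', _⟩
          · exact hrun1
          · exact hge p hp'
        · exact hge
      obtain ⟨h1, h2, h3⟩ := ih (t.dropWhile (fun d => d == c)) hlen d' hnd' hge'
      refine ⟨h1, h2, fun q => ?_⟩
      rw [h3 q]
      rw [runWeights]
      have hmemrun : q ∈ (List.range (1 + (t.takeWhile (fun d => d == c)).length)).map
            (fun i : Nat => ((i : Int) + 1) * lv c) ↔ reachP c run q := by
        rw [mem_runWeights_run]
        unfold reachP
        constructor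
        · rintro ⟨k, ⟨ha, hb⟩, rfl⟩
          exact ⟨k, ha, by rw [hrun]; push_cast at hb ⊢; omega, rfl⟩
        · rintro ⟨k, ha, hb, rfl⟩
          exact ⟨k, ⟨ha, by rw [hrun] at hb; push_cast at hb ⊢; omega⟩, rfl⟩
      have hitems : (∃ p ∈ d'.items, reachP p.1 p.2 q)
          ↔ (∃ p ∈ d.items, reachP p.1 p.2 q) ∨ reachP c run q := by
        rw [hd']; split
        · next hlt =>
          constructor
          · rintro ⟨p, hp, hr⟩
            rcases (PySem.Dict.mem_items_insert _ _ _ _).mp hp with rfl | ⟨hp', _⟩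
            · exact Or.inr hr
            · exact Or.inl ⟨p, hp', hr⟩
          · rintro (⟨p, hp, hr⟩ | hr)
            · by_cases hpc : p.1 = c
              · -- the overwritten entry: its old value is d.getD c 0 < run, reachP is monotone
                refine ⟨(c, run), PySem.Dict.mem_items_insert_self _ _ _, ?_⟩
                have hval : p.2 = d.getD c 0 := by
                  have : d.getD p.1 0 = p.2 :=
                    PySem.Dict.getD_of_mem_items d (by simpa using hp) hnd 0
                  rw [hpc] at this; omega
                rcases hr with ⟨k, hk1, hk2, rfl⟩
                exact ⟨k, hk1, by omega, by rw [← hpc]⟩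
              · exact ⟨p, (PySem.Dict.mem_items_insert _ _ _ _).mpr (Or.inr ⟨hp, hpc⟩), hr⟩
            · exact ⟨(c, run), PySem.Dict.mem_items_insert_self _ _ _, hr⟩
        · next hge0 =>
          rw [not_lt] at hge0
          constructor
          · exact fun h => Or.inl h
          · rintro (h | hr)
            · exact h
            · -- run ≤ stored longest: the stored entry (c, d.getD c 0) covers q
              have hcont : d.contains c = true := by
                by_contra hc
                have : d.getD c 0 = 0 :=
                  PySem.Dict.getD_of_not_contains d 0 (by simpa using hc)
                omega
              have hsome : d.get? c = some (d.getD c 0) := by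
                rcases hv : d.get? c with _ | w
                · rw [PySem.Dict.contains_eq_isSome_get? d c, hv] at hcont; simp at hcont
                · rw [PySem.Dict.getD_of_get?_eq_some d 0 hv]
              refine ⟨(c, d.getD c 0), PySem.Dict.mem_items_of_get?_eq_some d hsome, ?_⟩
              rcases hr with ⟨k, hk1, hk2, rfl⟩
              exact ⟨k, hk1, by omega, rfl⟩
      rw [hitems, List.mem_append, hmemrun]
      exact or_assoc

theorem reachQ_iff (l : List Char) (q : Int) :
    (reachQ (collectLongest l PySem.Dict.empty) q = true) ↔ q ∈ runWeights l := by
  obtain ⟨_, hge, h3⟩ := collectLongest_inv l.length l le_rfl PySem.Dict.empty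
    (by simp [PySem.Dict.empty]) (by simp [PySem.Dict.empty])
  unfold reachQ
  rw [List.any_eq_true]
  constructor
  · rintro ⟨p, hp, hb⟩
    have := (reachItem_iff p.1 p.2 q (hge p hp)).mp hb
    have := (h3 q).mp ⟨p, hp, this⟩
    simpa [PySem.Dict.empty] using this
  · intro hq
    have := (h3 q).mpr (Or.inr hq)
    rcases this with ⟨p, hp, hr⟩
    exact ⟨p, hp, (reachItem_iff p.1 p.2 q (hge p hp)).mpr hr⟩

theorem foldl_answers (queries : List Int) (ws : List Int) (acc : List String) :
    queries.foldl
        (fun answers query =>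
          if ws.contains query then answers ++ ["Yes"] else answers ++ ["No"]) acc
      = acc ++ queries.map (fun q => if ws.contains q then "Yes" else "No") := by
  induction queries generalizing acc with
  | nil => simp
  | cons q qs ih =>
    simp only [List.foldl_cons, List.map_cons]
    by_cases h : ws.contains q
    · rw [if_pos h, ih, if_pos h]; simp
    · rw [if_neg h, ih, if_neg h]; simp

-- ===== VERDICT (by name: the statement is the Claim_ definition above) =====
theorem weightedUniformString_spec : Claim_equal_weightedUniformString := by
  intro s queries _ hpre
  unfold Spec_weightedUniformString
  cases hs : s.toList with
  | nil => exact absurd hs hpre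
  | cons c t =>
    unfold weightedUniformString weightedUniformString_alt
    rw [hs]
    simp only [PySem.List.pyGet?_zero_cons, PySem.List.slice_from_one, List.tail_cons]
    rw [foldl_answers]
    have hw : (List.foldl stepA (c, (c.toNat : Int) - 96, [(c.toNat : Int) - 96]) t).2.2
        = runWeights (c :: t) := foldA_eq_runWeights t.length t le_rfl c
    simp only [List.nil_append]
    rw [hw]
    apply List.map_congr_left
    intro q _
    have : (runWeights (c :: t)).contains q
        = reachQ (collectLongest (c :: t) PySem.Dict.empty) q := by
      rw [Bool.eq_iff_iff, List.contains_iff_mem]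
      exact (reachQ_iff (c :: t) q).symm
    rw [this]

@[simp] theorem weightedUniformString_raises : Claim_raises_weightedUniformString := by
  unfold Claim_raises_weightedUniformString
  constructor
  · intro s queries _ hr hpre
    exact hpre hr
  · refine ⟨by decide, by decide, ?_⟩
    show weightedUniformString_alt "" [1] = ["No"]
    unfold weightedUniformString_alt
    simp [collectLongest, reachQ, PySem.Dict.empty]
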